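-- pv_equiv track=rewrite | github.com/ryanang333/UBSCodingChallenge24 | routes/dodge_bullet.py | find_dodge_instructions
-- ===== SOURCE A (Python) =====
-- def find_dodge_instructions(map_string):
--     # Parse the input map and find your location and bullets
--     lines = map_string.splitlines()
--     player_position = None
--     bullets = []
--
--     # Locate player position and bullets
--     for y, line in enumerate(lines):
--         for x, char in enumerate(line):
--             if char == '*':
--                 player_position = (x, y)
--             elif char in 'udrl':
--                 bullets.append((x, y, char))  # (x, y, direction)
--
--     if player_position is None:
--         return None
--
--     # Check possible moves and dodge bullets
--     possible_moves = {
--         'u': (0, 1),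
--         'd': (0, -1),
--         'l': (-1, 0),
--         'r': (1, 0)
--     }
--
--     instructions = []
--     for direction, (dx, dy) in possible_moves.items():
--         new_x = player_position[0] + dx
--         new_y = player_position[1] + dy
--
--         # Check boundaries
--         if 0 <= new_x < len(lines[0]) and 0 <= new_y < len(lines):
--             # Check if moving to this position would result in being hit by bullets
--             if not would_be_hit(new_x, new_y, bullets):
--                 instructions.append(direction)
--
--     # Return null if no valid instructions
--     return instructions if instructions else None
--
-- def would_be_hit(new_x, new_y, bullets):
--     # Check if moving to (new_x, new_y) will get hit by any bullets
--     for bullet_x, bullet_y, direction in bullets: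
--         # Calculate the new position of the bullet based on its movement
--         if direction == 'u' and bullet_y == new_y + 1 and bullet_x == new_x:  # Bullet moves up
--             return True
--         if direction == 'd' and bullet_y == new_y - 1 and bullet_x == new_x:  # Bullet moves down
--             return True
--         if direction == 'l' and bullet_x == new_x + 1 and bullet_y == new_y:  # Bullet moves left
--             return True
--         if direction == 'r' and bullet_x == new_x - 1 and bullet_y == new_y:  # Bullet moves right
--             return True
--
--     return False
-- ===== SOURCE B (Python) =====
-- def find_dodge_instructions(map_string):
--     # One pass over the map: record the player and the set of cells a bullet
--     # would hit next step, instead of re-scanning the bullet list per move.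
--     lines = map_string.splitlines()
--     player = None
--     threatened = set()
--     for y, line in enumerate(lines):
--         for x, ch in enumerate(line):
--             if ch == '*':
--                 player = (x, y)
--             elif ch == 'u':
--                 threatened.add((x, y - 1))
--             elif ch == 'd':
--                 threatened.add((x, y + 1))
--             elif ch == 'l':
--                 threatened.add((x - 1, y))
--             elif ch == 'r':
--                 threatened.add((x + 1, y))
--     if player is None:
--         return None
--     px, py = player
--     w, h = len(lines[0]), len(lines)
--     instructions = [
--         d for d, (nx, ny) in
--         (('u', (px, py + 1)), ('d', (px, py - 1)), ('l', (px - 1, py)), ('r', (px + 1, py)))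
--         if 0 <= nx < w and 0 <= ny < h and (nx, ny) not in threatened
--     ]
--     return instructions or None
-- ===== Notes on version B (the rewrite author's own statement) =====
-- stated objective: alternative
-- what changed: B replaces A's per-move rescan of the bullet list (would_be_hit) by a single pass that precomputes the set of threatened target cells during parsing, then filters the four candidate moves by set membership.
import Mathlib
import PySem

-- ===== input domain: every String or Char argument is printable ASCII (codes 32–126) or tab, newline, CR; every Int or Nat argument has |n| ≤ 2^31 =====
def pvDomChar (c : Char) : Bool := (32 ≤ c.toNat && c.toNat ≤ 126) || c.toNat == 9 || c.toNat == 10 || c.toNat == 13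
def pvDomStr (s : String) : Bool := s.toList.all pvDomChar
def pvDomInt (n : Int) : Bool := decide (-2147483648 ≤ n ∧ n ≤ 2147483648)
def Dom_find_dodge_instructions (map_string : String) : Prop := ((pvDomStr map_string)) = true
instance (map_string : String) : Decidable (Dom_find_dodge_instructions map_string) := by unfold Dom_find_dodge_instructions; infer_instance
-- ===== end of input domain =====

-- B precomputes the set of threatened cells in the parsing pass and filters the
-- four candidate moves by set membership; A rescans the bullet list per move.

-- ===== PORT A =====

def wouldBeHit (nx ny : Int) : List (Int × Int × Char) → Bool
  | [] => false
  | (bx, bly, d) :: rest =>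
    if d == 'u' && bly == ny + 1 && bx == nx then true
    else if d == 'd' && bly == ny - 1 && bx == nx then true
    else if d == 'l' && bx == nx + 1 && bly == ny then true
    else if d == 'r' && bx == nx - 1 && bly == ny then true
    else wouldBeHit nx ny rest

-- the parse loop of A: last '*' wins for the player, bullets collected in order
def scanA (lines : List String) : Option (Int × Int) × List (Int × Int × Char) :=
  (PySem.List.enumerate lines 0).foldl (fun st yl =>
    (PySem.List.enumerate yl.2.toList 0).foldl (fun st xc =>
      if xc.2 == '*' then (some (xc.1, yl.1), st.2)
      else if xc.2 == 'u' || xc.2 == 'd' || xc.2 == 'r' || xc.2 == 'l' then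
        (st.1, st.2 ++ [(xc.1, yl.1, xc.2)])
      else st) st) (none, [])

def find_dodge_instructions (map_string : String) : Option (List String) :=
  let lines := PySem.Str.splitlines map_string
  let st := scanA lines
  match st.1 with
  | none => none
  | some pp =>
    -- lines[0]: reached only with a player found, so lines ≠ [] (headD is exact here)
    let w : Int := PySem.Str.len (lines.headD "")
    let h : Int := lines.length
    let moves : List (String × Int × Int) := [("u", (0, 1)), ("d", (0, -1)), ("l", (-1, 0)), ("r", (1, 0))]
    let instructions := moves.foldl (fun acc m =>
      let nx := pp.1 + m.2.1
      let ny := pp.2 + m.2.2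
      if 0 ≤ nx ∧ nx < w ∧ 0 ≤ ny ∧ ny < h then
        if !wouldBeHit nx ny st.2 then acc ++ [m.1] else acc
      else acc) []
    if instructions.isEmpty then none else some instructions

-- ===== PORT B =====

-- the parse loop of B: player plus the SET of cells a bullet hits next step
def scanB (lines : List String) : Option (Int × Int) × PySem.Set (Int × Int) :=
  (PySem.List.enumerate lines 0).foldl (fun st yl =>
    (PySem.List.enumerate yl.2.toList 0).foldl (fun st xc =>
      if xc.2 == '*' then (some (xc.1, yl.1), st.2)
      else if xc.2 == 'u' then (st.1, PySem.Set.add st.2 (xc.1, yl.1 - 1))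
      else if xc.2 == 'd' then (st.1, PySem.Set.add st.2 (xc.1, yl.1 + 1))
      else if xc.2 == 'l' then (st.1, PySem.Set.add st.2 (xc.1 - 1, yl.1))
      else if xc.2 == 'r' then (st.1, PySem.Set.add st.2 (xc.1 + 1, yl.1))
      else st) st) (none, PySem.Set.empty)

def find_dodge_instructions_alt (map_string : String) : Option (List String) :=
  let lines := PySem.Str.splitlines map_string
  let st := scanB lines
  match st.1 with
  | none => none
  | some pp =>
    let w : Int := PySem.Str.len (lines.headD "")
    let h : Int := lines.length
    let cands : List (String × Int × Int) :=
      [("u", (pp.1, pp.2 + 1)), ("d", (pp.1, pp.2 - 1)), ("l", (pp.1 - 1, pp.2)), ("r", (pp.1 + 1, pp.2))]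
    let instructions := (cands.filter (fun c =>
      decide (0 ≤ c.2.1) && decide (c.2.1 < w) && decide (0 ≤ c.2.2) && decide (c.2.2 < h)
        && !(PySem.Set.contains st.2 c.2))).map (·.1)
    match instructions with
    | [] => none
    | _ => some instructions

-- ===== PRECONDITION & SPEC =====
def Spec_find_dodge_instructions (map_string : String) (out : Option (List String)) : Prop := out = find_dodge_instructions_alt map_string
instance (map_string : String) (out : Option (List String)) : Decidable (Spec_find_dodge_instructions map_string out) := by unfold Spec_find_dodge_instructions; infer_instance

-- ===== CLAIM (what is proved, stated in full; the proofs are below) =====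
def Claim_equal_find_dodge_instructions : Prop := ∀ (map_string : String), Dom_find_dodge_instructions map_string → Spec_find_dodge_instructions map_string (find_dodge_instructions map_string)

-- ===== LEMMAS AND PROOFS =====

-- relation between A's bullet list and B's threatened set
def ScanRel (bs : List (Int × Int × Char)) (S : PySem.Set (Int × Int)) : Prop :=
  ∀ nx ny : Int, PySem.Set.contains S (nx, ny) = wouldBeHit nx ny bs

theorem wouldBeHit_append (nx ny : Int) (bs cs : List (Int × Int × Char)) :
    wouldBeHit nx ny (bs ++ cs) = (wouldBeHit nx ny bs || wouldBeHit nx ny cs) := by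
  induction bs with
  | nil => simp [wouldBeHit]
  | cons b rest ih =>
    obtain ⟨bx, by', d⟩ := b
    simp only [List.cons_append, wouldBeHit]
    split_ifs <;> simp [ih]

theorem wouldBeHit_single (bx bly : Int) (d : Char) (nx ny : Int) :
    wouldBeHit nx ny [(bx, bly, d)] =
      ((d == 'u' && bly == ny + 1 && bx == nx) || (d == 'd' && bly == ny - 1 && bx == nx)
        || (d == 'l' && bx == nx + 1 && bly == ny) || (d == 'r' && bx == nx - 1 && bly == ny)) := by
  simp only [wouldBeHit]
  split_ifs with a b c e <;> simp_all

theorem contains_add_pair (S : PySem.Set (Int × Int)) (p q : Int × Int) :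
    PySem.Set.contains (PySem.Set.add S p) q = (PySem.Set.contains S q || q == p) := by
  rw [Bool.eq_iff_iff]
  simp [PySem.Set.contains_iff, PySem.Set.mem_add]

theorem scanChars_rel (cs : List (Int × Char)) (y : Int)
    (pl : Option (Int × Int)) (bs : List (Int × Int × Char)) (S : PySem.Set (Int × Int))
    (h : ScanRel bs S) :
    (cs.foldl (fun st xc =>
      if xc.2 == '*' then (some (xc.1, y), st.2)
      else if xc.2 == 'u' || xc.2 == 'd' || xc.2 == 'r' || xc.2 == 'l' then
        (st.1, st.2 ++ [(xc.1, y, xc.2)])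
      else st) (pl, bs)).1
    = (cs.foldl (fun st xc =>
      if xc.2 == '*' then (some (xc.1, y), st.2)
      else if xc.2 == 'u' then (st.1, PySem.Set.add st.2 (xc.1, y - 1))
      else if xc.2 == 'd' then (st.1, PySem.Set.add st.2 (xc.1, y + 1))
      else if xc.2 == 'l' then (st.1, PySem.Set.add st.2 (xc.1 - 1, y))
      else if xc.2 == 'r' then (st.1, PySem.Set.add st.2 (xc.1 + 1, y))
      else st) (pl, S)).1
    ∧ ScanRel
      (cs.foldl (fun st xc =>
        if xc.2 == '*' then (some (xc.1, y), st.2)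
        else if xc.2 == 'u' || xc.2 == 'd' || xc.2 == 'r' || xc.2 == 'l' then
          (st.1, st.2 ++ [(xc.1, y, xc.2)])
        else st) (pl, bs)).2
      (cs.foldl (fun st xc =>
        if xc.2 == '*' then (some (xc.1, y), st.2)
        else if xc.2 == 'u' then (st.1, PySem.Set.add st.2 (xc.1, y - 1))
        else if xc.2 == 'd' then (st.1, PySem.Set.add st.2 (xc.1, y + 1))
        else if xc.2 == 'l' then (st.1, PySem.Set.add st.2 (xc.1 - 1, y))
        else if xc.2 == 'r' then (st.1, PySem.Set.add st.2 (xc.1 + 1, y))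
        else st) (pl, S)).2 := by
  induction cs generalizing pl bs S with
  | nil => exact ⟨rfl, h⟩
  | cons xc rest ih =>
    obtain ⟨x, c⟩ := xc
    simp only [List.foldl_cons]
    by_cases h1 : c = '*'
    · subst h1; simp only [beq_self_eq_true, if_pos]
      exact ih _ _ _ h
    · by_cases h2 : c = 'u'
      · subst h2
        simp only [show ('u' == '*') = false by decide, if_neg, Bool.false_eq_true, not_false_eq_true,
          show ('u' == 'u') = true by decide, Bool.true_or, if_pos, reduceIte]
        refine ih _ _ _ ?_
        intro nx ny
        rw [contains_add_pair, wouldBeHit_append, ← h nx ny]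
        rw [wouldBeHit_single, Bool.eq_iff_iff]
        simp [Prod.ext_iff]
        constructor <;> rintro (a | a)
        · exact Or.inl a
        · right; omega
        · exact Or.inl a
        · right; omega
      · by_cases h3 : c = 'd'
        · subst h3
          simp only [show ('d' == '*') = false by decide, show ('d' == 'u') = false by decide,
            show ('d' == 'd') = true by decide, Bool.false_or, Bool.true_or, Bool.false_eq_true,
            not_false_eq_true, if_neg, if_pos, reduceIte]
          refine ih _ _ _ ?_
          intro nx ny
          rw [contains_add_pair, wouldBeHit_append, ← h nx ny]
          rw [wouldBeHit_single, Bool.eq_iff_iff]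
          simp [Prod.ext_iff]
          constructor <;> rintro (a | a)
          · exact Or.inl a
          · right; omega
          · exact Or.inl a
          · right; omega
        · by_cases h4 : c = 'l'
          · subst h4
            simp only [show ('l' == '*') = false by decide, show ('l' == 'u') = false by decide,
              show ('l' == 'd') = false by decide, show ('l' == 'r') = false by decide,
              show ('l' == 'l') = true by decide, Bool.false_or, Bool.or_true, Bool.false_eq_true,
              not_false_eq_true, if_neg, if_pos, reduceIte]
            refine ih _ _ _ ?_
            intro nx ny
            rw [contains_add_pair, wouldBeHit_append, ← h nx ny]
            rw [wouldBeHit_single, Bool.eq_iff_iff]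
            simp [Prod.ext_iff]
            constructor <;> rintro (a | a)
            · exact Or.inl a
            · right; omega
            · exact Or.inl a
            · right; omega
          · by_cases h5 : c = 'r'
            · subst h5
              simp only [show ('r' == '*') = false by decide, show ('r' == 'u') = false by decide,
                show ('r' == 'd') = false by decide, show ('r' == 'r') = true by decide,
                show ('r' == 'l') = false by decide, Bool.false_or, Bool.true_or, Bool.or_true,
                Bool.false_eq_true, not_false_eq_true, if_neg, if_pos, reduceIte]
              refine ih _ _ _ ?_
              intro nx ny
              rw [contains_add_pair, wouldBeHit_append, ← h nx ny]
              rw [wouldBeHit_single, Bool.eq_iff_iff]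
              simp [Prod.ext_iff]
              constructor <;> rintro (a | a)
              · exact Or.inl a
              · right; omega
              · exact Or.inl a
              · right; omega
            · have e1 : (c == '*') = false := by simp [h1]
              have e2 : (c == 'u') = false := by simp [h2]
              have e3 : (c == 'd') = false := by simp [h3]
              have e4 : (c == 'l') = false := by simp [h4]
              have e5 : (c == 'r') = false := by simp [h5]
              simp only [e1, e2, e3, e4, e5, Bool.false_or, Bool.false_eq_true, not_false_eq_true,
                if_neg, reduceIte]
              exact ih _ _ _ h

theorem scanLines_rel (ls : List (Int × String)) (pl : Option (Int × Int))
    (bs : List (Int × Int × Char)) (S : PySem.Set (Int × Int)) (h : ScanRel bs S) :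
    (ls.foldl (fun st yl =>
      (PySem.List.enumerate yl.2.toList 0).foldl (fun st xc =>
        if xc.2 == '*' then (some (xc.1, yl.1), st.2)
        else if xc.2 == 'u' || xc.2 == 'd' || xc.2 == 'r' || xc.2 == 'l' then
          (st.1, st.2 ++ [(xc.1, yl.1, xc.2)])
        else st) st) (pl, bs)).1
    = (ls.foldl (fun st yl =>
      (PySem.List.enumerate yl.2.toList 0).foldl (fun st xc =>
        if xc.2 == '*' then (some (xc.1, yl.1), st.2)
        else if xc.2 == 'u' then (st.1, PySem.Set.add st.2 (xc.1, yl.1 - 1))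
        else if xc.2 == 'd' then (st.1, PySem.Set.add st.2 (xc.1, yl.1 + 1))
        else if xc.2 == 'l' then (st.1, PySem.Set.add st.2 (xc.1 - 1, yl.1))
        else if xc.2 == 'r' then (st.1, PySem.Set.add st.2 (xc.1 + 1, yl.1))
        else st) st) (pl, S)).1
    ∧ ScanRel
      (ls.foldl (fun st yl =>
        (PySem.List.enumerate yl.2.toList 0).foldl (fun st xc =>
          if xc.2 == '*' then (some (xc.1, yl.1), st.2)
          else if xc.2 == 'u' || xc.2 == 'd' || xc.2 == 'r' || xc.2 == 'l' then
            (st.1, st.2 ++ [(xc.1, yl.1, xc.2)])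
          else st) st) (pl, bs)).2
      (ls.foldl (fun st yl =>
        (PySem.List.enumerate yl.2.toList 0).foldl (fun st xc =>
          if xc.2 == '*' then (some (xc.1, yl.1), st.2)
          else if xc.2 == 'u' then (st.1, PySem.Set.add st.2 (xc.1, yl.1 - 1))
          else if xc.2 == 'd' then (st.1, PySem.Set.add st.2 (xc.1, yl.1 + 1))
          else if xc.2 == 'l' then (st.1, PySem.Set.add st.2 (xc.1 - 1, yl.1))
          else if xc.2 == 'r' then (st.1, PySem.Set.add st.2 (xc.1 + 1, yl.1))
          else st) st) (pl, S)).2 := by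
  induction ls generalizing pl bs S with
  | nil => exact ⟨rfl, h⟩
  | cons yl restL ih =>
    simp only [List.foldl_cons]
    obtain ⟨e1, e2⟩ := scanChars_rel (PySem.List.enumerate yl.2.toList 0) yl.1 pl bs S h
    rw [show ((PySem.List.enumerate yl.2.toList 0).foldl (fun st xc =>
        if xc.2 == '*' then (some (xc.1, yl.1), st.2)
        else if xc.2 == 'u' then (st.1, PySem.Set.add st.2 (xc.1, yl.1 - 1))
        else if xc.2 == 'd' then (st.1, PySem.Set.add st.2 (xc.1, yl.1 + 1))
        else if xc.2 == 'l' then (st.1, PySem.Set.add st.2 (xc.1 - 1, yl.1))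
        else if xc.2 == 'r' then (st.1, PySem.Set.add st.2 (xc.1 + 1, yl.1))
        else st) (pl, S))
      = (((PySem.List.enumerate yl.2.toList 0).foldl (fun st xc =>
        if xc.2 == '*' then (some (xc.1, yl.1), st.2)
        else if xc.2 == 'u' || xc.2 == 'd' || xc.2 == 'r' || xc.2 == 'l' then
          (st.1, st.2 ++ [(xc.1, yl.1, xc.2)])
        else st) (pl, bs)).1,
        ((PySem.List.enumerate yl.2.toList 0).foldl (fun st xc =>
        if xc.2 == '*' then (some (xc.1, yl.1), st.2)
        else if xc.2 == 'u' then (st.1, PySem.Set.add st.2 (xc.1, yl.1 - 1))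
        else if xc.2 == 'd' then (st.1, PySem.Set.add st.2 (xc.1, yl.1 + 1))
        else if xc.2 == 'l' then (st.1, PySem.Set.add st.2 (xc.1 - 1, yl.1))
        else if xc.2 == 'r' then (st.1, PySem.Set.add st.2 (xc.1 + 1, yl.1))
        else st) (pl, S)).2) from by rw [e1]]
    exact ih _ _ _ e2

-- A's loop step in the boolean form B's filter uses
theorem stepA (w h nx ny : Int) (b : Bool) (acc : List String) (nm : String) :
    (if 0 ≤ nx ∧ nx < w ∧ 0 ≤ ny ∧ ny < h then (if !b then acc ++ [nm] else acc) else acc)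
      = (if (decide (0 ≤ nx) && decide (nx < w) && decide (0 ≤ ny) && decide (ny < h) && !b)
          then acc ++ [nm] else acc) := by
  by_cases hb : 0 ≤ nx ∧ nx < w ∧ 0 ≤ ny ∧ ny < h <;> cases b <;> simp_all <;> split_ifs <;> tauto

theorem tailEq (stA : Option (Int × Int) × List (Int × Int × Char))
    (stB : Option (Int × Int) × PySem.Set (Int × Int)) (w h : Int)
    (hp : stA.1 = stB.1) (hrel : ScanRel stA.2 stB.2) :
    (match stA.1 with
     | none => none
     | some pp =>
       if (List.foldl (fun (acc : List String) (m : String × Int × Int) =>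
            if 0 ≤ pp.1 + m.2.1 ∧ pp.1 + m.2.1 < w ∧ 0 ≤ pp.2 + m.2.2 ∧ pp.2 + m.2.2 < h then
              if !wouldBeHit (pp.1 + m.2.1) (pp.2 + m.2.2) stA.2 then acc ++ [m.1] else acc
            else acc) ([] : List String)
            [("u", (0 : Int), (1 : Int)), ("d", 0, -1), ("l", -1, 0), ("r", 1, 0)]).isEmpty then none
       else some (List.foldl (fun (acc : List String) (m : String × Int × Int) =>
            if 0 ≤ pp.1 + m.2.1 ∧ pp.1 + m.2.1 < w ∧ 0 ≤ pp.2 + m.2.2 ∧ pp.2 + m.2.2 < h then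
              if !wouldBeHit (pp.1 + m.2.1) (pp.2 + m.2.2) stA.2 then acc ++ [m.1] else acc
            else acc) ([] : List String)
            [("u", (0 : Int), (1 : Int)), ("d", 0, -1), ("l", -1, 0), ("r", 1, 0)]))
    = (match stB.1 with
     | none => none
     | some pp =>
       match (([("u", (pp.1, pp.2 + 1)), ("d", (pp.1, pp.2 - 1)), ("l", (pp.1 - 1, pp.2)),
            ("r", (pp.1 + 1, pp.2))].filter (fun (c : String × (Int × Int)) =>
         decide (0 ≤ c.2.1) && decide (c.2.1 < w) && decide (0 ≤ c.2.2) && decide (c.2.2 < h)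
           && !(PySem.Set.contains stB.2 c.2))).map (fun p => p.1)) with
       | [] => none
       | _ => some (([("u", (pp.1, pp.2 + 1)), ("d", (pp.1, pp.2 - 1)), ("l", (pp.1 - 1, pp.2)),
            ("r", (pp.1 + 1, pp.2))].filter (fun (c : String × (Int × Int)) =>
         decide (0 ≤ c.2.1) && decide (c.2.1 < w) && decide (0 ≤ c.2.2) && decide (c.2.2 < h)
           && !(PySem.Set.contains stB.2 c.2))).map (fun p => p.1))) := by
  rw [← hp]
  cases stA.1 with
  | none => rfl
  | some pp =>
    have key : (List.foldl (fun (acc : List String) (m : String × Int × Int) =>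
            if 0 ≤ pp.1 + m.2.1 ∧ pp.1 + m.2.1 < w ∧ 0 ≤ pp.2 + m.2.2 ∧ pp.2 + m.2.2 < h then
              if !wouldBeHit (pp.1 + m.2.1) (pp.2 + m.2.2) stA.2 then acc ++ [m.1] else acc
            else acc) ([] : List String)
            [("u", (0 : Int), (1 : Int)), ("d", 0, -1), ("l", -1, 0), ("r", 1, 0)])
        = (([("u", (pp.1, pp.2 + 1)), ("d", (pp.1, pp.2 - 1)), ("l", (pp.1 - 1, pp.2)),
            ("r", (pp.1 + 1, pp.2))].filter (fun (c : String × (Int × Int)) =>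
         decide (0 ≤ c.2.1) && decide (c.2.1 < w) && decide (0 ≤ c.2.2) && decide (c.2.2 < h)
           && !(PySem.Set.contains stB.2 c.2))).map (fun p => p.1)) := by
      simp only [List.foldl_cons, List.foldl_nil, List.filter_cons, List.filter_nil, stepA,
        add_zero, sub_eq_add_neg, hrel pp.1 (pp.2 + 1), hrel pp.1 (pp.2 + -1),
        hrel (pp.1 + -1) pp.2, hrel (pp.1 + 1) pp.2]
      split_ifs <;> rfl
    simp only [key]
    cases hk : (([("u", (pp.1, pp.2 + 1)), ("d", (pp.1, pp.2 - 1)), ("l", (pp.1 - 1, pp.2)),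
            ("r", (pp.1 + 1, pp.2))].filter (fun (c : String × (Int × Int)) =>
         decide (0 ≤ c.2.1) && decide (c.2.1 < w) && decide (0 ≤ c.2.2) && decide (c.2.2 < h)
           && !(PySem.Set.contains stB.2 c.2))).map (fun p => p.1)) with
    | nil => simp
    | cons a l => simp

-- ===== VERDICT (by name: the statement is the Claim_ definition above) =====
theorem find_dodge_instructions_spec : Claim_equal_find_dodge_instructions := by
  intro s _
  unfold Spec_find_dodge_instructions find_dodge_instructions find_dodge_instructions_alt
  obtain ⟨e1, e2⟩ := scanLines_rel (PySem.List.enumerate (PySem.Str.splitlines s) 0)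
    none [] PySem.Set.empty (fun nx ny => rfl)
  simp only [scanA, scanB]
  exact tailEq _ _ (PySem.Str.len ((PySem.Str.splitlines s).headD "")) ((PySem.Str.splitlines s).length : Int) e1 e2
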